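-- pv_equiv track=rewrite | github.com/winash1618/Python-DS-ML | Python Modules/Module 01/ex04/eval.py | enumerate_evaluate
-- ===== SOURCE A (Python) =====
-- def enumerate_evaluate(coefs, words) -> any:
--     """
--     compute the sum of the lengths of every words of
--     a given list weighted by a list of coefficinents coefs
--     """
--     if not len(coefs) == len(words):
--         return -1
--     total = 0
--     for i, coef in enumerate(coefs):
--         for j, word in enumerate(words):
--             if i == j:
--                 total += coef * len(word)
--     return total
-- ===== SOURCE B (Python) =====
-- def enumerate_evaluate(coefs, words) -> any:
--     n = len(words)
--     if len(coefs) != n: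
--         return -1
--     total = 0
--     i = n - 1
--     while i >= 0:
--         total += coefs[i] * len(words[i])
--         i -= 1
--     return total
-- ===== Notes on version B (the rewrite author's own statement) =====
-- stated objective: faster
-- what changed: Replaced the nested enumerate loops (which rescan all words for each coefficient to find the matching index) with a single back-to-front indexed while-loop accumulating coefs[i]*len(words[i]).
import Mathlib
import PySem

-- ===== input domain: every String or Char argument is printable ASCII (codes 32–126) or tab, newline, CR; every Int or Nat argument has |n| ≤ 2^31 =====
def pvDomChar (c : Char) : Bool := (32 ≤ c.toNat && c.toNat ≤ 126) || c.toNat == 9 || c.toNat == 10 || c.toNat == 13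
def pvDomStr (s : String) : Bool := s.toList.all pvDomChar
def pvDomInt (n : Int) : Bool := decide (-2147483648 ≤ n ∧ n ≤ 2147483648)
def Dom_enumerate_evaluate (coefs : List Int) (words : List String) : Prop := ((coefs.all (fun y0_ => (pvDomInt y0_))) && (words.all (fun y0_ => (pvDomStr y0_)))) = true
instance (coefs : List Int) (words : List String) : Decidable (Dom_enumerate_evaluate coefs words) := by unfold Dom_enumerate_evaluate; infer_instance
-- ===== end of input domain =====

-- B replaces A's nested enumerate loops with one back-to-front indexed while-loop; objective: faster (asymptotic, O(n^2) -> O(n)).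

-- ===== PORT A =====
-- Literal port of A: length guard, then a nested fold over enumerate(coefs) × enumerate(words), adding coef * len(word) when i == j.
def enumerate_evaluate (coefs : List Int) (words : List String) : Int :=
  if ¬ (PySem.List.len coefs = PySem.List.len words) then -1
  else
    (PySem.List.enumerate coefs).foldl
      (fun total ic =>
        (PySem.List.enumerate words).foldl
          (fun t jw => if ic.1 = jw.1 then t + ic.2 * PySem.Str.len jw.2 else t)
          total)
      0

-- ===== PORT B =====
-- B's while-loop, counting i downwards; the Nat argument is i+1 (0 = loop exit, i < 0).
-- coefs[i] / words[i] are ported with getD: the index is always in range (0 ≤ i < n), so this is exact.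
def pvLoopB (coefs : List Int) (words : List String) (total : Int) : Nat → Int
  | 0 => total
  | k + 1 => pvLoopB coefs words (total + coefs.getD k 0 * PySem.Str.len (words.getD k "")) k

-- Literal port of B: length guard, total = 0, i = n - 1, loop while i >= 0.
def enumerate_evaluate_alt (coefs : List Int) (words : List String) : Int :=
  if PySem.List.len coefs ≠ PySem.List.len words then -1
  else pvLoopB coefs words 0 words.length

-- ===== PRECONDITION & SPEC =====
def Spec_enumerate_evaluate (coefs : List Int) (words : List String) (out : Int) : Prop := out = enumerate_evaluate_alt coefs words
instance (coefs : List Int) (words : List String) (out : Int) : Decidable (Spec_enumerate_evaluate coefs words out) := by unfold Spec_enumerate_evaluate; infer_instance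

-- ===== CLAIM (what is proved, stated in full; the proofs are below) =====
def Claim_equal_enumerate_evaluate : Prop := ∀ (coefs : List Int) (words : List String), Dom_enumerate_evaluate coefs words → Spec_enumerate_evaluate coefs words (enumerate_evaluate coefs words)

-- ===== LEMMAS AND PROOFS =====

-- B's loop computes total plus the dot-product sum over indices < n.
theorem pvLoopB_sum (coefs : List Int) (words : List String) (n : Nat) :
    ∀ t : Int, pvLoopB coefs words t n
      = t + ∑ k ∈ Finset.range n, coefs.getD k 0 * PySem.Str.len (words.getD k "") := by
  induction n with
  | zero => intro t; simp [pvLoopB]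
  | succ n ih =>
    intro t
    rw [pvLoopB, ih, Finset.sum_range_succ]
    ring

-- If every index in the enumeration exceeds i, A's inner fold adds nothing.
theorem pv_skip (i coef : Int) (ws : List String) (s t : Int) (h : i < s) :
    (PySem.List.enumerate ws s).foldl
      (fun t jw => if i = jw.1 then t + coef * PySem.Str.len jw.2 else t) t = t := by
  induction ws generalizing s t with
  | nil => simp [PySem.List.enumerate_nil]
  | cons w ws ih =>
    rw [PySem.List.enumerate_cons]
    simp only [List.foldl_cons, if_neg (by omega : ¬ i = s)]
    exact ih (s + 1) t (by omega)

-- A's inner fold over enumerate(ws, s) with index i = s + k adds coef * len(ws[k]) exactly once.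
theorem pv_inner (coef : Int) (ws : List String) (s i t : Int) (k : Nat)
    (hk : k < ws.length) (hik : i = s + k) :
    (PySem.List.enumerate ws s).foldl
      (fun t jw => if i = jw.1 then t + coef * PySem.Str.len jw.2 else t) t
      = t + coef * PySem.Str.len (ws[k]) := by
  induction ws generalizing s t k with
  | nil => simp at hk
  | cons w ws ih =>
    rw [PySem.List.enumerate_cons]
    cases k with
    | zero =>
      simp only [Nat.cast_zero, add_zero] at hik
      subst hik
      simp only [List.foldl_cons]
      rw [pv_skip i coef ws (i + 1) _ (by omega)]
      simp
    | succ k =>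
      simp only [List.foldl_cons, if_neg (by omega : ¬ i = s)]
      have := ih (s + 1) t k (by simpa using hk) (by push_cast at hik ⊢; omega)
      rw [this]
      simp

-- A's outer fold over the tail of coefs starting at index s equals t plus the shifted dot-product sum.
theorem pv_outer (words : List String) (cs : List Int) (s : Nat) (t : Int)
    (hlen : s + cs.length = words.length) :
    (PySem.List.enumerate cs (s : Int)).foldl
      (fun total ic =>
        (PySem.List.enumerate words).foldl
          (fun t jw => if ic.1 = jw.1 then t + ic.2 * PySem.Str.len jw.2 else t)
          total) t
    = t + ∑ k ∈ Finset.range cs.length,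
        cs.getD k 0 * PySem.Str.len (words.getD (s + k) "") := by
  induction cs generalizing s t with
  | nil => simp [PySem.List.enumerate_nil]
  | cons c cs ih =>
    rw [PySem.List.enumerate_cons]
    simp only [List.foldl_cons]
    have hk : s < words.length := by simp at hlen; omega
    rw [pv_inner c words 0 (s : Int) t s hk (by omega)]
    have hcast : ((s : Int) + 1) = ((s + 1 : Nat) : Int) := by push_cast; ring
    rw [hcast, ih (s + 1) _ (by simp at hlen ⊢; omega)]
    simp only [List.length_cons]
    rw [Finset.sum_range_succ' (fun k => (c :: cs).getD k 0 * PySem.Str.len (words.getD (s + k) ""))]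
    have hget : words.getD s "" = words[s] := List.getD_eq_getElem words "" hk
    simp only [List.getD_cons_zero, List.getD_cons_succ, Nat.add_zero, hget]
    have : ∀ k : Nat, s + 1 + k = s + (k + 1) := by omega
    simp only [this]
    ring

-- ===== VERDICT (by name: the statement is the Claim_ definition above) =====
theorem enumerate_evaluate_spec : Claim_equal_enumerate_evaluate := by
  intro coefs words _
  unfold Spec_enumerate_evaluate enumerate_evaluate enumerate_evaluate_alt
  by_cases h : PySem.List.len coefs = PySem.List.len words
  · rw [if_neg (by simpa using h), if_neg (by simpa using h)]
    have hlen : coefs.length = words.length := by simpa using h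
    have hA := pv_outer words coefs 0 0 (by simpa using hlen)
    have hB := pvLoopB_sum coefs words words.length 0
    simp only [Nat.cast_zero] at hA
    rw [hA, hB, hlen]
    simp
  · rw [if_pos (by simpa using h), if_pos (by simpa using h)]
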